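-- pv_equiv track=rewrite | github.com/sardor-prgmr/Masalalar- | MINAB.py | MINAB
-- ===== SOURCE A (Python) =====
-- def MINAB(n):
--     a1 = 0
--     b1 = 0
--     for a in range(1, n):
--         for b in range(1, a):
--             if n == a*b:
--                 a1 = a
--                 b1 = b
--                 break
--     if len(str(a1)) >= len(str(b1)):
--         return len(str(b1))
--     elif len(str(a1)) < len(str(b1)):
--         return len(str(a1))
-- ===== SOURCE B (Python) =====
-- def MINAB(n):
--     best = 0
--     for a in range(1, n):
--         if n % a == 0:
--             b = n // a
--             if 0 < b < a:
--                 best = b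
--     return len(str(best))
-- ===== Notes on version B (the rewrite author's own statement) =====
-- stated objective: faster
-- what changed: Replaces the quadratic nested scan over all pairs (a,b) by a single linear pass that tests divisibility n % a and takes the quotient, tracking only the smaller-factor value (the final digit-length comparison disappears since the smaller factor never has more digits).
import Mathlib
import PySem

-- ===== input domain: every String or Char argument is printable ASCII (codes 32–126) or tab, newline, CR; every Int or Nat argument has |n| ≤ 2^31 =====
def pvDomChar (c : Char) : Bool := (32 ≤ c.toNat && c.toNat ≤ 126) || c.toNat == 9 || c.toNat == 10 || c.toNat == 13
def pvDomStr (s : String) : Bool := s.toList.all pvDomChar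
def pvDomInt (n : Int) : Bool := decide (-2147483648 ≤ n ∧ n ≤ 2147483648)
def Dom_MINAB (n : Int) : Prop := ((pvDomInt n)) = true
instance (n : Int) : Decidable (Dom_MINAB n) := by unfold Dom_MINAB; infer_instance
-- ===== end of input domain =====

-- B replaces A's O(n^2) nested pair scan by a single pass using divisibility and the
-- quotient, tracking only the smaller factor (objective: faster, asymptotic).

-- ===== PORT A =====
-- inner loop: for b in range(1, a): if n == a*b: set state and break
def MINAB_inner (n a : Int) : List Int → Int × Int → Int × Int
  | [], st => st
  | b :: bs, st => if n = a * b then (a, b) else MINAB_inner n a bs st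

-- outer loop: for a in range(1, n)
def MINAB_outer (n : Int) : List Int → Int × Int → Int × Int
  | [], st => st
  | a :: as, st => MINAB_outer n as (MINAB_inner n a (PySem.List.pyRange 1 a) st)

def MINAB (n : Int) : Int :=
  let st := MINAB_outer n (PySem.List.pyRange 1 n) (0, 0)
  if PySem.Str.len (PySem.Int.toStr st.1) ≥ PySem.Str.len (PySem.Int.toStr st.2) then
    PySem.Str.len (PySem.Int.toStr st.2)
  else
    PySem.Str.len (PySem.Int.toStr st.1)

-- ===== PORT B =====
-- loop body: if n % a == 0: b = n // a; if 0 < b < a: best = b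
def MINAB_altStep (n a best : Int) : Int :=
  if PySem.Int.mod n a = 0 then
    let b := PySem.Int.floordiv n a
    if 0 < b ∧ b < a then b else best
  else best

def MINAB_altLoop (n : Int) : List Int → Int → Int
  | [], best => best
  | a :: as, best => MINAB_altLoop n as (MINAB_altStep n a best)

def MINAB_alt (n : Int) : Int :=
  PySem.Str.len (PySem.Int.toStr (MINAB_altLoop n (PySem.List.pyRange 1 n) 0))

-- ===== PRECONDITION & SPEC =====
def Spec_MINAB (n : Int) (out : Int) : Prop := out = MINAB_alt n
instance (n : Int) (out : Int) : Decidable (Spec_MINAB n out) := by unfold Spec_MINAB; infer_instance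

-- ===== CLAIM (what is proved, stated in full; the proofs are below) =====
def Claim_equal_MINAB : Prop := ∀ (n : Int), Dom_MINAB n → Spec_MINAB n (MINAB n)

-- ===== LEMMAS AND PROOFS =====

-- A's inner loop finds no pair when no b in the list works
theorem MINAB_inner_none (n a : Int) (bs : List Int) (st : Int × Int)
    (h : ∀ b ∈ bs, n ≠ a * b) : MINAB_inner n a bs st = st := by
  induction bs with
  | nil => rfl
  | cons b bs ih =>
      simp only [MINAB_inner]
      rw [if_neg (h b (List.mem_cons_self))]
      exact ih fun b hb => h b (List.mem_cons_of_mem _ hb)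

-- A's inner loop returns (a, q) when q is the unique solution and lies in the list
theorem MINAB_inner_mem (n a q : Int) (bs : List Int) (st : Int × Int)
    (hq : n = a * q) (huniq : ∀ b, n = a * b → b = q) (hmem : q ∈ bs) :
    MINAB_inner n a bs st = (a, q) := by
  induction bs with
  | nil => cases hmem
  | cons b bs ih =>
      simp only [MINAB_inner]
      by_cases hb : n = a * b
      · rw [if_pos hb, huniq b hb]
      · rw [if_neg hb]
        rcases List.mem_cons.mp hmem with h | h
        · exact absurd (by rw [← h]; exact hq) hb
        · exact ih h

-- characterisation of A's inner loop over range(1, a) by B's step condition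
theorem MINAB_inner_spec (n a : Int) (ha : 0 < a) (st : Int × Int) :
    MINAB_inner n a (PySem.List.pyRange 1 a) st =
      if PySem.Int.mod n a = 0 ∧ 0 < PySem.Int.floordiv n a ∧ PySem.Int.floordiv n a < a then
        (a, PySem.Int.floordiv n a)
      else st := by
  have ha0 : a ≠ 0 := ne_of_gt ha
  rw [PySem.Int.floordiv_eq_ediv_of_pos ha]
  split_ifs with hc
  · obtain ⟨hmod, hqpos, hqlt⟩ := hc
    have hdvd : a ∣ n := (PySem.Int.mod_eq_zero_iff_dvd n a).mp hmod
    have hq : n = a * (n / a) := (Int.mul_ediv_cancel' hdvd).symm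
    refine MINAB_inner_mem n a (n / a) _ st hq ?_ ?_
    · intro b hb
      have hab : a * (n / a) = a * b := by rw [← hq, ← hb]
      exact (mul_left_cancel₀ ha0 hab).symm
    · exact PySem.List.mem_pyRange_one.mpr ⟨hqpos, hqlt⟩
  · refine MINAB_inner_none n a _ st ?_
    intro b hb hnb
    have hrange := PySem.List.mem_pyRange_one.mp hb
    have hdvd : a ∣ n := Dvd.intro _ hnb.symm
    have hmod : PySem.Int.mod n a = 0 := (PySem.Int.mod_eq_zero_iff_dvd n a).mpr hdvd
    have hqb : n / a = b := by
      rw [hnb, Int.mul_ediv_cancel_left _ ha0]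
    exact hc ⟨hmod, by omega, by omega⟩

-- the second components of A's outer loop and B's loop agree
theorem MINAB_loop_snd (n : Int) (as : List Int) (hpos : ∀ a ∈ as, 0 < a)
    (st : Int × Int) : (MINAB_outer n as st).2 = MINAB_altLoop n as st.2 := by
  induction as generalizing st with
  | nil => rfl
  | cons a as ih =>
      have ha : 0 < a := hpos a (List.mem_cons_self)
      simp only [MINAB_outer, MINAB_altLoop]
      rw [MINAB_inner_spec n a ha st,
        ih (fun x hx => hpos x (List.mem_cons_of_mem _ hx))]
      congr 1
      unfold MINAB_altStep
      split_ifs <;> simp_all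
-- invariant of A's outer loop: the state stays (big, small) with small nonnegative
theorem MINAB_loop_inv (n : Int) (as : List Int) (hpos : ∀ a ∈ as, 0 < a)
    (st : Int × Int) (h1 : 0 ≤ st.2) (h2 : st.2 ≤ st.1) :
    0 ≤ (MINAB_outer n as st).2 ∧ (MINAB_outer n as st).2 ≤ (MINAB_outer n as st).1 := by
  induction as generalizing st with
  | nil => exact ⟨h1, h2⟩
  | cons a as ih =>
      have ha : 0 < a := hpos a (List.mem_cons_self)
      simp only [MINAB_outer]
      rw [MINAB_inner_spec n a ha st]
      have hpos' := fun x hx => hpos x (List.mem_cons_of_mem a hx)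
      split_ifs with hc
      · exact ih hpos' _ (by omega) (by omega)
      · exact ih hpos' _ h1 h2

-- length of Nat.toDigits 10 is log₁₀ + 1 (not in Mathlib, which only has an upper bound)
theorem toDigitsCore_len (f : Nat) : ∀ n l, n ≤ f →
    (Nat.toDigitsCore 10 (f + 1) n l).length = l.length + Nat.log 10 n + 1 := by
  induction f with
  | zero =>
      intro n l hn
      interval_cases n
      simp [Nat.toDigitsCore]
  | succ f ih =>
      intro n l hn
      have hunf : Nat.toDigitsCore 10 (f + 1 + 1) n l =
          if n / 10 = 0 then (n % 10).digitChar :: l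
          else Nat.toDigitsCore 10 (f + 1) (n / 10) ((n % 10).digitChar :: l) := rfl
      rw [hunf]
      by_cases h : n / 10 = 0
      · rw [if_pos h]
        have : n < 10 := by omega
        simp [Nat.log_eq_zero_iff.mpr (Or.inl this)]
      · rw [if_neg h]
        have h10 : 10 ≤ n := by
          by_contra hlt
          exact h (Nat.div_eq_of_lt (by omega))
        rw [ih (n / 10) _ (by omega)]
        rw [Nat.log_of_one_lt_of_le (by norm_num) h10]
        simp only [List.length_cons]
        omega

theorem toDigits_len (n : Nat) : (Nat.toDigits 10 n).length = Nat.log 10 n + 1 := by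
  have := toDigitsCore_len n n [] (le_refl n)
  simpa [Nat.toDigits] using this

-- decimal digit count is monotone on nonnegative integers
theorem strlen_toStr_mono (x y : Int) (hx : 0 ≤ x) (hxy : x ≤ y) :
    PySem.Str.len (PySem.Int.toStr x) ≤ PySem.Str.len (PySem.Int.toStr y) := by
  rw [PySem.Str.len_eq, PySem.Str.len_eq, PySem.Int.toList_toStr, PySem.Int.toList_toStr]
  unfold PySem.Int.toChars
  rw [if_neg (by omega), if_neg (by omega)]
  rw [toDigits_len, toDigits_len]
  have : x.toNat ≤ y.toNat := Int.toNat_le_toNat hxy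
  have := Nat.log_mono_right (b := 10) this
  omega

-- ===== VERDICT (by name: the statement is the Claim_ definition above) =====
theorem MINAB_spec : Claim_equal_MINAB := by
  intro n _
  unfold Spec_MINAB MINAB MINAB_alt
  have hpos : ∀ a ∈ PySem.List.pyRange 1 n, (0:Int) < a := by
    intro a ha
    have := PySem.List.mem_pyRange_one.mp ha
    omega
  have hsnd := MINAB_loop_snd n (PySem.List.pyRange 1 n) hpos (0, 0)
  have hinv := MINAB_loop_inv n (PySem.List.pyRange 1 n) hpos (0, 0)
    (by norm_num) (by norm_num)
  set st := MINAB_outer n (PySem.List.pyRange 1 n) (0, 0) with hst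
  rw [if_pos (strlen_toStr_mono st.2 st.1 hinv.1 hinv.2)]
  rw [← hsnd]
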